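-- pv_equiv track=rewrite | github.com/cognitive-functors/adaptive-topology | code/c4-classifier/demo.py | score_axis
-- ===== SOURCE A (Python) =====
-- from typing import Tuple, Dict, List, Optional
--
-- def score_axis(text: str, keywords: Dict[int, List[str]]) -> int:
--     """Score text against keyword lists, return axis value with highest match count."""
--     text_lower = text.lower()
--     scores = {v: 0 for v in keywords}
--     for value, kws in keywords.items():
--         for kw in kws:
--             if kw.lower() in text_lower:
--                 scores[value] += 1
--     # Default to 1 (Present/Concrete/Self) if no matches
--     best = max(scores, key=scores.get)
--     return best if scores[best] > 0 else 1
-- ===== SOURCE B (Python) =====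
-- def score_axis(text: str, keywords) -> int:
--     """Score text against keyword lists, return axis value with highest match count."""
--     text_lower = text.lower()
--     n = len(text_lower)
--     # index the text once: the set of all its substrings of the needed lengths
--     lengths = {len(kw) for kws in keywords.values() for kw in kws}
--     subs = {text_lower[i:i + L] for L in lengths for i in range(n - L + 1)}
--     best_value, best_count = 1, 0
--     for value, kws in keywords.items():
--         count = sum(kw.lower() in subs for kw in kws)
--         if count > best_count:
--             best_value, best_count = value, count
--     return best_value
-- ===== Notes on version B (the rewrite author's own statement) =====
-- stated objective: alternative
-- what changed: B indexes the lowercased text once into a set of all its substrings of the keyword lengths, so every keyword test becomes a set lookup instead of a per-keyword substring scan, and a single accumulator loop replaces A's scores dict plus max()-with-key pass.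
import Mathlib
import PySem

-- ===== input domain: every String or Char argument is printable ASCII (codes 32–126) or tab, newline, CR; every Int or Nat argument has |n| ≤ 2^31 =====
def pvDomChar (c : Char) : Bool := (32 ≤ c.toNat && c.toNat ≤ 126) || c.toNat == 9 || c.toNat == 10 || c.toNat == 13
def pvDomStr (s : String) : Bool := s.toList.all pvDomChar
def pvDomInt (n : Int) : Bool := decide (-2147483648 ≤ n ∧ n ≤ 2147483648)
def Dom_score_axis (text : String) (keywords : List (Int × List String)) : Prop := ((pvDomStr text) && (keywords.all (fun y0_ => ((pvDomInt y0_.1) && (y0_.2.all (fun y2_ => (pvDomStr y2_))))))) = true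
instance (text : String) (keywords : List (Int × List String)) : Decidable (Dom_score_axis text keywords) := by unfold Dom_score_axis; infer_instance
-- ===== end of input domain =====

-- B indexes the text ONCE into a hash set of all its substrings of the needed lengths,
-- so each keyword test is a set lookup instead of a substring scan (objective: alternative).

-- ===== PORT A =====
def score_axis (text : String) (keywords : List (Int × List String)) : Int :=
  let text_lower := PySem.Str.lower text
  let scores : PySem.Dict Int Int :=
    keywords.foldl (fun d p => d.insert p.1 0) PySem.Dict.empty
  let scores := keywords.foldl (fun d p =>
      p.2.foldl (fun d kw =>
        if PySem.Str.isIn (PySem.Str.lower kw) text_lower then d.modify p.1 0 (· + 1) else d) d)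
    scores
  match PySem.List.max? scores.keys (fun v => scores.getD v 0) with
  | some best => if scores.getD best 0 > 0 then best else 1
  | none => 1  -- unreachable under Pre_: Python's max raises ValueError on the empty dict

-- ===== PORT B =====
def score_axis_alt (text : String) (keywords : List (Int × List String)) : Int :=
  let text_lower := PySem.Str.lower text
  let n : Int := PySem.Str.len text_lower
  let lengths : PySem.Set Int :=
    PySem.Set.ofList ((keywords.flatMap (fun p => p.2)).map (fun kw => PySem.Str.len kw))
  let subs : PySem.Set String :=
    PySem.Set.ofList (lengths.flatMap (fun L =>
      (PySem.List.pyRange 0 (n - L + 1) 1).map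
        (fun i => PySem.Str.slice text_lower (some i) (some (i + L)))))
  (keywords.foldl (fun best p =>
      let c : Int := (p.2.countP (fun kw => PySem.Set.contains subs (PySem.Str.lower kw)) : Nat)
      if c > best.2 then (p.1, c) else best) ((1 : Int), (0 : Int))).1

-- ===== PRECONDITION & SPEC =====
-- Pre_ excludes the empty dict (A's max() raises ValueError there) and association lists with
-- duplicate axis keys, which do not represent a Python dict (A's argument is a dict).
def Pre_score_axis (text : String) (keywords : List (Int × List String)) : Prop :=
  keywords ≠ [] ∧ (keywords.map Prod.fst).Nodup
instance (text : String) (keywords : List (Int × List String)) : Decidable (Pre_score_axis text keywords) := by unfold Pre_score_axis; infer_instance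

def pvWitness_score_axis : String × (List (Int × List String)) :=
  ("go deep", [(2, ["go"]), (3, ["zz"])])

def Spec_score_axis (text : String) (keywords : List (Int × List String)) (out : Int) : Prop := out = score_axis_alt text keywords
instance (text : String) (keywords : List (Int × List String)) (out : Int) : Decidable (Spec_score_axis text keywords out) := by unfold Spec_score_axis; infer_instance

-- ===== CLAIM (what is proved, stated in full; the proofs are below) =====
def Claim_equal_score_axis : Prop := ∀ (text : String) (keywords : List (Int × List String)), Dom_score_axis text keywords → Pre_score_axis text keywords → Spec_score_axis text keywords (score_axis text keywords)
-- ===== LEMMAS AND PROOFS =====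

-- the per-axis match count, and the per-key column sum A's dict accumulates
def pvCnt (q : String → Bool) (p : Int × List String) : Int := (p.2.countP q : Nat)
def pvSsum (q : String → Bool) (l : List (Int × List String)) (v : Int) : Int :=
  (l.map (fun p => if p.1 = v then pvCnt q p else 0)).sum

-- inner keyword loop of A: adds the filtered count at key k
lemma inner_getD (q : String → Bool) (kws : List String) (k v : Int)
    (d : PySem.Dict Int Int) :
    (kws.foldl (fun d kw => if q kw then d.modify k 0 (· + 1) else d) d).getD v 0
      = d.getD v 0 + (if v = k then (kws.countP q : Int) else 0) := by
  induction kws generalizing d with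
  | nil => simp
  | cons kw t ih =>
    simp only [List.foldl_cons, List.countP_cons]
    by_cases hq : q kw
    · rw [if_pos hq, ih, PySem.Dict.getD_modify]
      by_cases hv : v = k <;> simp [hv, hq] <;> ring
    · rw [if_neg hq, ih]; simp [hq]

-- outer loop of A on the dict: lookups accumulate pvSsum
lemma outer_getD (q : String → Bool) (l : List (Int × List String))
    (d : PySem.Dict Int Int) (v : Int) :
    (l.foldl (fun d p =>
        p.2.foldl (fun d kw => if q kw then d.modify p.1 0 (· + 1) else d) d) d).getD v 0
      = d.getD v 0 + pvSsum q l v := by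
  induction l generalizing d with
  | nil => simp [pvSsum]
  | cons p t ih =>
    simp only [List.foldl_cons]
    rw [ih, inner_getD]
    simp only [pvSsum, pvCnt, List.map_cons, List.sum_cons]
    by_cases hv : v = p.1
    · rw [if_pos hv, if_pos hv.symm]; ring
    · rw [if_neg hv, if_neg (fun hh => hv hh.symm)]; ring

-- the zero-initialising loop leaves every lookup at 0
lemma init_getD (l : List (Int × List String)) (d : PySem.Dict Int Int) (v : Int)
    (h : d.getD v 0 = 0) :
    (l.foldl (fun d p => d.insert p.1 0) d).getD v 0 = 0 := by
  induction l generalizing d with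
  | nil => simpa using h
  | cons p t ih =>
    simp only [List.foldl_cons]
    apply ih
    rw [PySem.Dict.getD_insert]
    split <;> simp [h]

-- keys of the final dict are the axis values, in order
lemma init_keys (l : List (Int × List String)) :
    (l.foldl (fun d p => d.insert p.1 (0 : Int)) PySem.Dict.empty).keys
      = PySem.Set.ofList (l.map Prod.fst) := by
  rw [PySem.Dict.keys_foldl_insert_key]
  simp [PySem.Set.update, PySem.Set.ofList_eq_foldl]

lemma inner_keys (q : String → Bool) (kws : List String) (k : Int)
    (d : PySem.Dict Int Int) (hk : d.contains k = true) :
    (kws.foldl (fun d kw => if q kw then d.modify k 0 (· + 1) else d) d).keys = d.keys := by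
  induction kws generalizing d with
  | nil => rfl
  | cons kw t ih =>
    simp only [List.foldl_cons]
    by_cases hq : q kw
    · rw [if_pos hq]
      have hkeys : (d.modify k 0 (· + 1)).keys = d.keys := by
        rw [PySem.Dict.keys_modify, PySem.Dict.keys_insert_of_contains _ _ hk]
      rw [ih _ (by rw [PySem.Dict.contains_iff_mem_keys, hkeys,
        ← PySem.Dict.contains_iff_mem_keys]; exact hk), hkeys]
    · rw [if_neg hq, ih _ hk]

lemma outer_keys (q : String → Bool) (l : List (Int × List String))
    (d : PySem.Dict Int Int) (h : ∀ p ∈ l, d.contains p.1 = true) :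
    (l.foldl (fun d p =>
        p.2.foldl (fun d kw => if q kw then d.modify p.1 0 (· + 1) else d) d) d).keys
      = d.keys := by
  induction l generalizing d with
  | nil => rfl
  | cons p t ih =>
    simp only [List.foldl_cons]
    have hkeys := inner_keys q p.2 p.1 d (h p (List.mem_cons_self ..))
    rw [ih _ (fun r hr => by
      rw [PySem.Dict.contains_iff_mem_keys, hkeys, ← PySem.Dict.contains_iff_mem_keys]
      exact h r (List.mem_cons_of_mem _ hr)), hkeys]

-- pvSsum at a key of a Nodup-keyed list is that entry's count
lemma Ssum_of_not_mem (q : String → Bool) (l : List (Int × List String)) (v : Int)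
    (h : v ∉ l.map Prod.fst) : pvSsum q l v = 0 := by
  induction l with
  | nil => simp [pvSsum]
  | cons p t ih =>
    simp only [List.map_cons, List.mem_cons, not_or] at h
    simp only [pvSsum, List.map_cons, List.sum_cons] at *
    rw [if_neg (fun hh => h.1 hh.symm), ih h.2]
    simp

lemma Ssum_of_mem (q : String → Bool) (l : List (Int × List String))
    (hnd : (l.map Prod.fst).Nodup) (p : Int × List String) (hp : p ∈ l) :
    pvSsum q l p.1 = pvCnt q p := by
  induction l with
  | nil => simp at hp
  | cons r t ih =>
    simp only [List.map_cons, List.nodup_cons] at hnd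
    rcases List.mem_cons.mp hp with h | h
    · subst h
      simp only [pvSsum, List.map_cons, List.sum_cons, if_true]
      rw [show (t.map (fun p' => if p'.1 = p.1 then pvCnt q p' else 0)).sum = pvSsum q t p.1 from rfl,
        Ssum_of_not_mem q t p.1 hnd.1, add_zero]
    · have hne : r.1 ≠ p.1 := fun he => hnd.1 (he ▸ List.mem_map_of_mem h)
      simp only [pvSsum, List.map_cons, List.sum_cons, if_neg hne]
      rw [show (t.map (fun p' => if p'.1 = p.1 then pvCnt q p' else 0)).sum = pvSsum q t p.1 from rfl,
        ih hnd.2 h, zero_add]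

-- max? over a mapped list, with agreeing keys
lemma max?_map_key {α β : Type} (l : List α) (f : α → β) (k : β → Int) (k' : α → Int)
    (h : ∀ x ∈ l, k (f x) = k' x) :
    PySem.List.max? (l.map f) k = Option.map f (PySem.List.max? l k') := by
  have aux : ∀ (l' : List α) (acc : Option α), (∀ x ∈ l', k (f x) = k' x) →
      (∀ m, acc = some m → k (f m) = k' m) →
      List.foldl (fun acc x => match acc with
        | none => some x
        | some m => if k m < k x then some x else some m) (Option.map f acc) (l'.map f)
      = Option.map f (List.foldl (fun acc x => match acc with
        | none => some x
        | some m => if k' m < k' x then some x else some m) acc l') := by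
    intro l'
    induction l' with
    | nil => intro acc _ _; simp
    | cons x t ih =>
      intro acc hx hacc
      simp only [List.map_cons, List.foldl_cons]
      cases acc with
      | none =>
        exact ih (some x) (fun y hy => hx y (List.mem_cons_of_mem _ hy))
          (fun m hm => by cases hm; exact hx x (List.mem_cons_self ..))
      | some m =>
        simp only [Option.map_some]
        rw [hacc m rfl, hx x (List.mem_cons_self ..)]
        split
        · exact ih (some x) (fun y hy => hx y (List.mem_cons_of_mem _ hy))
            (fun m' hm' => by cases hm'; exact hx x (List.mem_cons_self ..))
        · exact ih (some m) (fun y hy => hx y (List.mem_cons_of_mem _ hy))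
            (fun m' hm' => by cases hm'; exact hacc m rfl)
  simpa [PySem.List.max?] using aux l none h (fun m hm => by cases hm)

-- the pair-tracking step shared by both normal forms
def pvG (m p : Int × Int) : Int × Int := if m.2 < p.2 then p else m

lemma max?_cons_pairs (t : List (Int × Int)) (p : Int × Int) :
    PySem.List.max? (p :: t) (fun r : Int × Int => r.2) = some (t.foldl pvG p) := by
  induction t generalizing p with
  | nil => rfl
  | cons x t ih =>
    have h1 : PySem.List.max? (p :: x :: t) (fun r : Int × Int => r.2)
        = PySem.List.max? (pvG p x :: t) (fun r : Int × Int => r.2) := by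
      simp only [PySem.List.max?, List.foldl_cons, pvG]
      split <;> rfl
    rw [h1, ih, List.foldl_cons]

lemma pvG_mono (t : List (Int × Int)) (m : Int × Int) : m.2 ≤ (t.foldl pvG m).2 := by
  induction t generalizing m with
  | nil => simp
  | cons p t ih =>
    simp only [List.foldl_cons, pvG]
    split
    · exact le_trans (le_of_lt (by assumption)) (ih p)
    · exact ih m

lemma pvG_zero (t : List (Int × Int)) (m : Int × Int)
    (hpos : ∀ p ∈ t, 0 ≤ p.2) (hm : m.2 = 0) :
    (if 0 < (t.foldl pvG m).2 then (t.foldl pvG m).1 else 1)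
      = (t.foldl pvG (1, 0)).1 := by
  induction t generalizing m with
  | nil => simp [hm]
  | cons p t ih =>
    have hp0 : 0 ≤ p.2 := hpos p (List.mem_cons_self ..)
    by_cases hp : 0 < p.2
    · simp only [List.foldl_cons, pvG, if_pos (hm ▸ hp : m.2 < p.2),
        if_pos (show (1, (0:Int)).2 < p.2 from hp)]
      rw [if_pos (lt_of_lt_of_le hp (pvG_mono t p))]
    · have hp2 : p.2 = 0 := le_antisymm (not_lt.mp hp) hp0
      simp only [List.foldl_cons, pvG, if_neg (by omega : ¬ m.2 < p.2),
        if_neg (show ¬ (1, (0:Int)).2 < p.2 by simp; omega)]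
      exact ih m (fun r hr => hpos r (List.mem_cons_of_mem _ hr)) hm

-- lower() preserves length (it is a character map)
lemma len_lower (s : String) : PySem.Str.len (PySem.Str.lower s) = PySem.Str.len s := by
  simp [PySem.Str.len_eq, PySem.Str.toList_lower, PySem.Chars.lower]

-- B's substring set: membership of a string whose length is one of the indexed lengths
-- is exactly Python's 'p in t'
lemma contains_subs_iff (t p : String) (lengths : List Int)
    (hpos : ∀ L ∈ lengths, 0 ≤ L)
    (hL : PySem.Str.len p ∈ lengths) :
    PySem.Set.contains (PySem.Set.ofList (lengths.flatMap (fun L =>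
      (PySem.List.pyRange 0 (PySem.Str.len t - L + 1) 1).map
        (fun i => PySem.Str.slice t (some i) (some (i + L)))))) p
      = PySem.Str.isIn p t := by
  rw [Bool.eq_iff_iff, show (PySem.Set.contains (PySem.Set.ofList (lengths.flatMap (fun L =>
      (PySem.List.pyRange 0 (PySem.Str.len t - L + 1) 1).map
        (fun i => PySem.Str.slice t (some i) (some (i + L)))))) p = true)
      ↔ p ∈ lengths.flatMap (fun L =>
      (PySem.List.pyRange 0 (PySem.Str.len t - L + 1) 1).map
        (fun i => PySem.Str.slice t (some i) (some (i + L)))) from by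
    rw [show PySem.Set.contains (PySem.Set.ofList (lengths.flatMap (fun L =>
      (PySem.List.pyRange 0 (PySem.Str.len t - L + 1) 1).map
        (fun i => PySem.Str.slice t (some i) (some (i + L)))))) p
        = List.contains (PySem.Set.ofList (lengths.flatMap (fun L =>
      (PySem.List.pyRange 0 (PySem.Str.len t - L + 1) 1).map
        (fun i => PySem.Str.slice t (some i) (some (i + L)))))) p from rfl,
      List.contains_iff_mem]
    exact PySem.Set.mem_ofList _ _, PySem.Str.isIn_iff_infix]
  constructor
  · intro hmem
    obtain ⟨L, hLmem, hp⟩ := List.mem_flatMap.mp hmem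
    obtain ⟨i, hi, hpi⟩ := List.mem_map.mp hp
    obtain ⟨hi0, hilt⟩ := PySem.List.mem_pyRange_one.mp hi
    have hL0 : 0 ≤ L := hpos L hLmem
    have hslice : p.toList = (t.toList.drop i.toNat).take L.toNat := by
      rw [← hpi, PySem.Str.toList_slice, PySem.Chars.slice_eq_listSlice,
        show i = ((i.toNat : Nat) : Int) from (Int.toNat_of_nonneg hi0).symm,
        show L = ((L.toNat : Nat) : Int) from (Int.toNat_of_nonneg hL0).symm,
        PySem.List.slice_natCast_add, Int.toNat_natCast, Int.toNat_natCast]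
    exact List.infix_iff_prefix_suffix.mpr ⟨t.toList.drop i.toNat,
      by rw [hslice]; exact List.take_prefix _ _, List.drop_suffix _ _⟩
  · intro hinf
    obtain ⟨j, hpre⟩ := (PySem.Chars.exists_prefix_drop_iff_isIn p.toList t.toList).mpr
      ((PySem.Str.isIn_iff_infix p t).mpr hinf)
    set s := t.toList with hs
    set Ln := p.toList.length with hLn
    -- clamp the match position into [0, |s|]
    set j0 := min j s.length with hj0
    have hpre' : p.toList <+: s.drop j0 := by
      rcases le_total j s.length with h | h
      · rw [hj0, min_eq_left h]; exact hpre
      · have h1 : s.drop j = [] := List.drop_eq_nil_of_le h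
        have h2 : s.drop j0 = [] := List.drop_eq_nil_of_le (by rw [hj0, min_eq_right h])
        rw [h2, ← h1]; exact hpre
    have htake : p.toList = (s.drop j0).take Ln := List.prefix_iff_eq_take.mp hpre'
    have hLle : Ln ≤ s.length - j0 := by
      have := hpre'.length_le
      simpa [hLn] using this
    have hj0n : j0 ≤ s.length := by omega
    have hlen : PySem.Str.len p = (Ln : Int) := by
      rw [PySem.Str.len_eq]
    have hslen : PySem.Str.len t = (s.length : Int) := by
      rw [PySem.Str.len_eq]
    refine List.mem_flatMap.mpr ⟨PySem.Str.len p, hL, List.mem_map.mpr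
      ⟨(j0 : Int), PySem.List.mem_pyRange_one.mpr ⟨Int.natCast_nonneg _, ?_⟩, ?_⟩⟩
    · rw [hlen, hslen]
      omega
    · apply String.toList_inj.mp
      rw [PySem.Str.toList_slice, PySem.Chars.slice_eq_listSlice, hlen,
        PySem.List.slice_natCast_add]
      exact htake.symm

-- B rewritten with Python's substring test: the indexed set lookup equals 'kw in text'
lemma altB_eq (text : String) (keywords : List (Int × List String)) :
    score_axis_alt text keywords
      = (keywords.foldl (fun best p =>
          let c : Int := (p.2.countP (fun kw =>
            PySem.Str.isIn (PySem.Str.lower kw) (PySem.Str.lower text)) : Nat)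
          if c > best.2 then (p.1, c) else best) ((1 : Int), (0 : Int))).1 := by
  unfold score_axis_alt
  simp only []
  refine congrArg Prod.fst (PySem.List.foldl_congr_mem _ _ _ _ ?_)
  intro acc p hp
  have hcnt : p.2.countP (fun kw => PySem.Set.contains (PySem.Set.ofList
        ((PySem.Set.ofList ((keywords.flatMap (fun p => p.2)).map
            (fun kw => PySem.Str.len kw))).flatMap (fun L =>
          (PySem.List.pyRange 0 (PySem.Str.len (PySem.Str.lower text) - L + 1) 1).map
            (fun i => PySem.Str.slice (PySem.Str.lower text) (some i) (some (i + L))))))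
        (PySem.Str.lower kw))
      = p.2.countP (fun kw => PySem.Str.isIn (PySem.Str.lower kw) (PySem.Str.lower text)) := by
    apply List.countP_congr
    intro kw hkw
    rw [contains_subs_iff]
    · intro L hLm
      obtain ⟨kw', _, hkw'⟩ := List.mem_map.mp ((PySem.Set.mem_ofList _ _).mp hLm)
      rw [← hkw', PySem.Str.len_eq]
      exact Int.natCast_nonneg _
    · rw [len_lower]
      exact (PySem.Set.mem_ofList _ _).mpr (List.mem_map_of_mem
        (List.mem_flatMap.mpr ⟨p, hp, hkw⟩))
  rw [hcnt]

-- ===== VERDICT (by name: the statement is the Claim_ definition above) =====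
theorem score_axis_spec : Claim_equal_score_axis := by
  intro text keywords _ hpre
  obtain ⟨hne, hnd⟩ := hpre
  unfold Spec_score_axis
  rw [altB_eq]
  unfold score_axis
  simp only []
  set q : String → Bool := fun kw => PySem.Str.isIn (PySem.Str.lower kw) (PySem.Str.lower text) with hq
  set f : Int × List String → Int × Int := fun p => (p.1, pvCnt q p) with hf
  set d0 : PySem.Dict Int Int := keywords.foldl (fun d p => d.insert p.1 0) PySem.Dict.empty with hd0
  set d1 : PySem.Dict Int Int := keywords.foldl (fun d p =>
      p.2.foldl (fun d kw => if q kw then d.modify p.1 0 (· + 1) else d) d) d0 with hd1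
  -- lookups of A's final dict
  have hgetD : ∀ v, d1.getD v 0 = pvSsum q keywords v := by
    intro v
    rw [hd1, outer_getD, hd0, init_getD _ _ _ (PySem.Dict.getD_empty _ _), zero_add]
  have hgetD' : ∀ p ∈ keywords, d1.getD p.1 0 = pvCnt q p := by
    intro p hp; rw [hgetD, Ssum_of_mem q keywords hnd p hp]
  -- keys of A's final dict
  have hk0 : d0.keys = keywords.map Prod.fst := by
    rw [hd0, init_keys, PySem.Set.ofList_eq_self_of_nodup _ hnd]
  have hk1 : d1.keys = keywords.map Prod.fst := by
    rw [hd1, outer_keys q keywords d0 (fun p hp => by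
      rw [PySem.Dict.contains_iff_mem_keys, hk0]; exact List.mem_map_of_mem hp), hk0]
  -- both sides through max? keywords (pvCnt q)
  cases hm : PySem.List.max? keywords (pvCnt q) with
  | none => exact absurd ((PySem.List.max?_eq_none_iff _ _).mp hm) hne
  | some m =>
  have hmax : PySem.List.max? d1.keys (fun v => d1.getD v 0) = some m.1 := by
    rw [hk1, max?_map_key keywords Prod.fst _ (pvCnt q) (fun p hp => hgetD' p hp), hm]
    rfl
  have hmaxL : PySem.List.max? (keywords.map f) (fun r : Int × Int => r.2) = some (f m) := by
    rw [max?_map_key keywords f _ (pvCnt q) (fun p hp => rfl), hm]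
    rfl
  have hmmem := PySem.List.max?_mem hm
  -- B's loop is the pvG fold over the mapped pairs
  have hB : (keywords.foldl (fun best p =>
        if ((p.2.countP q : Nat) : Int) > best.2 then (p.1, ((p.2.countP q : Nat) : Int)) else best)
        ((1 : Int), (0 : Int)))
      = (keywords.map f).foldl pvG ((1 : Int), (0 : Int)) := by
    rw [List.foldl_map]
    rfl
  rw [hB, hmax]
  simp only [gt_iff_lt]
  rw [hgetD' m hmmem]
  -- normal form of A's max over the mapped pairs
  cases hl : keywords with
  | nil => exact absurd hl hne
  | cons p t =>
  have hpos : ∀ r ∈ t.map f, 0 ≤ r.2 := by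
    intro r hr
    obtain ⟨x, _, hx⟩ := List.mem_map.mp hr
    subst hx; exact Int.natCast_nonneg _
  have hcons : PySem.List.max? ((p :: t).map f) (fun r : Int × Int => r.2)
      = some ((t.map f).foldl pvG (f p)) := by
    rw [List.map_cons]
    exact max?_cons_pairs (t.map f) (f p)
  rw [hl] at hmaxL
  rw [hcons] at hmaxL
  have hM : (t.map f).foldl pvG (f p) = f m := Option.some.inj hmaxL
  simp only [List.map_cons, List.foldl_cons]
  by_cases hp : 0 < (f p).2
  · have h10 : pvG ((1 : Int), (0 : Int)) (f p) = f p := by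
      simp only [pvG]; rw [if_pos hp]
    rw [h10, hM]
    have : 0 < (f m).2 := lt_of_lt_of_le hp (hM ▸ pvG_mono (t.map f) (f p))
    rw [if_pos (show 0 < pvCnt q m from this)]
  · have hp2 : (f p).2 = 0 := le_antisymm (not_lt.mp hp) (Int.natCast_nonneg _)
    have h10 : pvG ((1 : Int), (0 : Int)) (f p) = ((1 : Int), (0 : Int)) := by
      simp only [pvG]; rw [if_neg (by simpa using hp)]
    rw [h10]
    have hz := pvG_zero (t.map f) (f p) hpos hp2
    rw [hM] at hz
    exact hz
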